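-- pv_equiv track=rewrite | github.com/gyorilab/indra_gpt | indra_gpt/chat_curate/chat_curate.py | find_synonyms
-- ===== SOURCE A (Python) =====
-- def find_synonyms(
--     ev_text: str,
--     eng_stmt: str,
--     synonym_list,
--     case_sensitive=False,
--     substring_match=False,
-- ):
--     """Find which synonym is in the evidence text and in the English stmt
--
--     Parameters
--     ----------
--     ev_text : str
--         The evidence text.
--     eng_stmt : str
--         The English statement.
--     synonym_list : list
--         A list of synonyms for the agent.
--     case_sensitive : bool
--         Whether to match case when looking for synonyms.
--     substring_match : bool
--         Whether to allow substring match or not. If allowed, the synonym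
--         must match in both the text and the statement at the same time, i.e.
--         the names are the same but could be embedded in text e.g.
--         "RIG-I" matches "... RIG-I-induced activation...".
--
--     Returns
--     -------
--     tuple
--         A tuple of the synonym in the evidence text and the synonym in the
--         English statement. A synonym is None if it is not found in the text
--         or the statement.
--     """
--
--     def _clean(s):
--         return (
--             s.replace("(", " ")
--             .replace(")", " ")
--             .replace(":", " ")
--             .replace(";", " ")
--             .replace("?", " ")
--             .replace("!", " ")
--             .replace(",", " ")
--             .replace(".", " ")
--             .replace("/", " ")
--             .replace("  ", " ")
--         )
--
--     # Remove possible punctuations and parentheses and then split the string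
--     # on space to match exact words instead of substrings.
--     ev_text = ev_text.lower() if not case_sensitive else ev_text
--     org_ev_text = ev_text
--     ev_text = _clean(ev_text)
--     ev_text_list = ev_text.split()
--
--     eng_stmt = eng_stmt.lower() if not case_sensitive else eng_stmt
--     org_eng_stmt = eng_stmt
--     eng_stmt = _clean(eng_stmt)
--     eng_stmt_list = eng_stmt.split()
--
--     text_syn = None
--     eng_syn = None
--     for syn in synonym_list:
--         syn_lower = syn.lower() if not case_sensitive else syn
--         if text_syn is None and syn_lower in ev_text_list:
--             text_syn = syn
--         if eng_syn is None and syn_lower in eng_stmt_list: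
--             eng_syn = syn
--
--         if text_syn and eng_syn:
--             break
--
--     # If by now one or both of the synonyms are not found, try substring
--     # match, if requested.
--     if substring_match and (text_syn is None or eng_syn is None):
--         for syn in synonym_list:
--             syn_lower = syn.lower() if not case_sensitive else syn
--             if text_syn is None and syn_lower in org_ev_text:
--                 text_syn = syn
--             if eng_syn is None and syn_lower in org_eng_stmt:
--                 eng_syn = syn
--
--             if text_syn and eng_syn:
--                 break
--
--     return text_syn, eng_syn
-- ===== SOURCE B (Python) =====
-- def find_synonyms(
--     ev_text: str,
--     eng_stmt: str,
--     synonym_list,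
--     case_sensitive=False,
--     substring_match=False,
-- ):
--     """Same result as A, computed by inverting the word-match loop: a hash
--     index maps each (case-adjusted) synonym to its first position, the words
--     of each target are looked up in it and the synonym with the minimal
--     position wins; only if no word of the target is indexed and
--     substring_match is set, a lazy generator yields the first synonym that is
--     a substring of the target."""
--
--     def _clean(s):
--         return (
--             s.replace("(", " ")
--             .replace(")", " ")
--             .replace(":", " ")
--             .replace(";", " ")
--             .replace("?", " ")
--             .replace("!", " ")
--             .replace(",", " ")
--             .replace(".", " ")
--             .replace("/", " ")
--             .replace("  ", " ")
--         )
--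
--     def _adj(s):
--         return s if case_sensitive else s.lower()
--
--     index = {}
--     for i, syn in enumerate(synonym_list):
--         index.setdefault(_adj(syn), i)
--
--     def _pick(word_list, original):
--         hits = [index[w] for w in word_list if w in index]
--         if hits:
--             return synonym_list[min(hits)]
--         if substring_match:
--             return next((syn for syn in synonym_list if _adj(syn) in original), None)
--         return None
--
--     org_ev = _adj(ev_text)
--     org_eng = _adj(eng_stmt)
--     return (
--         _pick(_clean(org_ev).split(), org_ev),
--         _pick(_clean(org_eng).split(), org_eng),
--     )
-- ===== Notes on version B (the rewrite author's own statement) =====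
-- stated objective: alternative
-- what changed: A's two interleaved forward scans of the synonym list (None-guards, early break) are replaced by an inverted word match: a hash index from each case-adjusted synonym to its first position is built once, each target's words are looked up in it and the synonym with the minimal position wins, with a lazy generator for the first substring match as the (optional) fallback.
import Mathlib
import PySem

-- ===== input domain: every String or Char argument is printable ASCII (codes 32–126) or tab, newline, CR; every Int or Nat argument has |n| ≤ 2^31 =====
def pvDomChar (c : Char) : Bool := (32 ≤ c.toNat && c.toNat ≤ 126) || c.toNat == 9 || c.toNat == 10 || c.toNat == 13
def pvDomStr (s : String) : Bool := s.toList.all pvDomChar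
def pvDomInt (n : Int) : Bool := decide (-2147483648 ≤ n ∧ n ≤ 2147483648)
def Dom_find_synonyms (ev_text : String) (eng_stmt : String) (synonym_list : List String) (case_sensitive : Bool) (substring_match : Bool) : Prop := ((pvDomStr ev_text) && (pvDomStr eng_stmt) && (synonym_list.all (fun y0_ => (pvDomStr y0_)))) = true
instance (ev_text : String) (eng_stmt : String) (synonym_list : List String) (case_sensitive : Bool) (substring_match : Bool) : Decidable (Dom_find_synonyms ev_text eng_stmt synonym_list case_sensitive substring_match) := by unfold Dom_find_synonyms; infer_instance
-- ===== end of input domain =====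

-- B inverts A's word-match scan: a hash index (adjusted synonym -> first position) is built once,
-- the target's words are looked up in it and the minimal position wins; a lazy first-substring-match fallback (alternative algorithm, same cost class).

-- ===== PORT A =====

-- the _clean helper of A: ten successive str.replace calls
def pvClean (s : String) : String :=
  PySem.Str.replace (PySem.Str.replace (PySem.Str.replace (PySem.Str.replace (PySem.Str.replace
    (PySem.Str.replace (PySem.Str.replace (PySem.Str.replace (PySem.Str.replace (PySem.Str.replace
      s "(" " ") ")" " ") ":" " ") ";" " ") "?" " ") "!" " ") "," " ") "." " ") "/" " ") "  " " "

-- Python truthiness of an Optional[str]: None and "" are falsy (used only in A's break condition)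
def pvTruthy (o : Option String) : Bool :=
  match o with
  | some s => !s.toList.isEmpty
  | none => false

-- the shape of BOTH of A's loops: update each side only while it is None, break when both are truthy
def pvLoop (p q : String → Bool) : List String → Option String → Option String → Option String × Option String
  | [], t, e => (t, e)
  | syn :: rest, t, e =>
    let t' := if t.isNone && p syn then some syn else t
    let e' := if e.isNone && q syn then some syn else e
    if pvTruthy t' && pvTruthy e' then (t', e') else pvLoop p q rest t' e'

def find_synonyms (ev_text : String) (eng_stmt : String) (synonym_list : List String) (case_sensitive : Bool) (substring_match : Bool) : Option String × Option String :=
  let ev_text1 := if !case_sensitive then PySem.Str.lower ev_text else ev_text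
  let org_ev_text := ev_text1
  let ev_text2 := pvClean ev_text1
  let ev_text_list := PySem.Str.split₀ ev_text2
  let eng_stmt1 := if !case_sensitive then PySem.Str.lower eng_stmt else eng_stmt
  let org_eng_stmt := eng_stmt1
  let eng_stmt2 := pvClean eng_stmt1
  let eng_stmt_list := PySem.Str.split₀ eng_stmt2
  -- first loop: exact word match (syn_lower in ev_text_list / eng_stmt_list)
  let r1 := pvLoop
    (fun syn => ev_text_list.contains (if !case_sensitive then PySem.Str.lower syn else syn))
    (fun syn => eng_stmt_list.contains (if !case_sensitive then PySem.Str.lower syn else syn))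
    synonym_list none none
  -- second loop: substring match on the uncleaned (case-adjusted) strings, if requested
  if substring_match && (r1.1.isNone || r1.2.isNone) then
    pvLoop
      (fun syn => PySem.Str.isIn (if !case_sensitive then PySem.Str.lower syn else syn) org_ev_text)
      (fun syn => PySem.Str.isIn (if !case_sensitive then PySem.Str.lower syn else syn) org_eng_stmt)
      synonym_list r1.1 r1.2
  else r1

-- ===== PORT B =====

-- Source B's _adj
def pvAdj (case_sensitive : Bool) (s : String) : String :=
  if case_sensitive then s else PySem.Str.lower s

-- Source B's index: for i, syn in enumerate(synonym_list): index.setdefault(_adj(syn), i)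
def pvIndex (case_sensitive : Bool) (synonym_list : List String) : PySem.Dict String Int :=
  (PySem.List.enumerate synonym_list 0).foldl
    (fun d p => PySem.Dict.setdefault d (pvAdj case_sensitive p.2) p.1) PySem.Dict.empty

-- Source B's _pick: look the target's words up in the index, take the synonym at the minimal
-- index; else (if enabled) the lazy generator for the first substring match
def pvPick (case_sensitive : Bool) (substring_match : Bool) (synonym_list : List String)
    (idx : PySem.Dict String Int) (word_list : List String) (original : String) : Option String :=
  let hits := word_list.filterMap (fun w => PySem.Dict.get? idx w)
  match PySem.List.min? hits (fun x => x) with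
  | some i => PySem.List.pyGet? synonym_list i
  | none =>
    if substring_match then
      synonym_list.find? (fun syn => PySem.Str.isIn (pvAdj case_sensitive syn) original)
    else none

def find_synonyms_alt (ev_text : String) (eng_stmt : String) (synonym_list : List String) (case_sensitive : Bool) (substring_match : Bool) : Option String × Option String :=
  let idx := pvIndex case_sensitive synonym_list
  let org_ev := pvAdj case_sensitive ev_text
  let org_eng := pvAdj case_sensitive eng_stmt
  (pvPick case_sensitive substring_match synonym_list idx (PySem.Str.split₀ (pvClean org_ev)) org_ev,
   pvPick case_sensitive substring_match synonym_list idx (PySem.Str.split₀ (pvClean org_eng)) org_eng)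

-- ===== PRECONDITION & SPEC =====
def Spec_find_synonyms (ev_text : String) (eng_stmt : String) (synonym_list : List String) (case_sensitive : Bool) (substring_match : Bool) (out : Option String × Option String) : Prop := out = find_synonyms_alt ev_text eng_stmt synonym_list case_sensitive substring_match
instance (ev_text : String) (eng_stmt : String) (synonym_list : List String) (case_sensitive : Bool) (substring_match : Bool) (out : Option String × Option String) : Decidable (Spec_find_synonyms ev_text eng_stmt synonym_list case_sensitive substring_match out) := by unfold Spec_find_synonyms; infer_instance

-- ===== CLAIM (what is proved, stated in full; the proofs are below) =====
def Claim_equal_find_synonyms : Prop := ∀ (ev_text : String) (eng_stmt : String) (synonym_list : List String) (case_sensitive : Bool) (substring_match : Bool), Dom_find_synonyms ev_text eng_stmt synonym_list case_sensitive substring_match → Spec_find_synonyms ev_text eng_stmt synonym_list case_sensitive substring_match (find_synonyms ev_text eng_stmt synonym_list case_sensitive substring_match)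

-- ===== LEMMAS AND PROOFS =====

-- A's loop computes, for each side independently, "keep it if already set, else the first hit":
-- the break and the empty-string truthiness quirk never change the result.
theorem pvLoop_eq (p q : String → Bool) (l : List String) (t e : Option String) :
    pvLoop p q l t e = (t.or (l.find? p), e.or (l.find? q)) := by
  induction l generalizing t e with
  | nil => cases t <;> cases e <;> simp [pvLoop]
  | cons syn rest ih =>
    cases t <;> cases e <;>
      simp only [pvLoop, Option.isNone_some, Option.isNone_none, Bool.false_and, Bool.true_and,
        List.find?_cons] <;>
      split_ifs <;>
      simp_all [pvTruthy, Option.or]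

-- the index built by setdefault maps w to the first position of a pair whose adjusted form is w
theorem pvIndex_foldl_get (cs : Bool) (w : String) (ps : List (Int × String))
    (d : PySem.Dict String Int) :
    PySem.Dict.get? (ps.foldl (fun d p => PySem.Dict.setdefault d (pvAdj cs p.2) p.1) d) w =
      (PySem.Dict.get? d w).or ((ps.find? (fun p => pvAdj cs p.2 == w)).map Prod.fst) := by
  induction ps generalizing d with
  | nil => simp
  | cons p ps ih =>
    simp only [List.foldl_cons, ih, List.find?_cons]
    by_cases hw : pvAdj cs p.2 = w
    · subst hw
      rw [PySem.Dict.get?_setdefault_self]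
      simp only [beq_self_eq_true, Option.map_some]
      cases PySem.Dict.get? d (pvAdj cs p.2) <;> simp [Option.or]
    · have hb : (pvAdj cs p.2 == w) = false := by simp [hw]
      rw [PySem.Dict.get?_setdefault_of_ne d p.1 (Ne.symm hw)]
      simp only [hb]

theorem pvIndex_get (cs : Bool) (l : List String) (w : String) :
    PySem.Dict.get? (pvIndex cs l) w =
      ((PySem.List.enumerate l 0).find? (fun p => pvAdj cs p.2 == w)).map Prod.fst := by
  unfold pvIndex
  rw [pvIndex_foldl_get]
  simp [PySem.Dict.get?_empty]

-- pvPick in terms of find?: the minimal indexed hit IS the first word-matching synonym;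
-- then the (possibly disabled) substring match
theorem pvPick_eq (cs sm : Bool) (l : List String) (ws : List String) (original : String) :
    pvPick cs sm l (pvIndex cs l) ws original =
      (l.find? (fun syn => ws.contains (pvAdj cs syn))).or
        (if sm then l.find? (fun syn => PySem.Str.isIn (pvAdj cs syn) original) else none) := by
  unfold pvPick
  simp only [pvIndex_get]
  cases hf : l.find? (fun syn => ws.contains (pvAdj cs syn)) with
  | none =>
    have hnil : ws.filterMap
        (fun w => ((PySem.List.enumerate l 0).find? (fun p => pvAdj cs p.2 == w)).map Prod.fst)
        = [] := by
      rw [List.filterMap_eq_nil_iff]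
      intro w hwmem
      rw [Option.map_eq_none_iff, List.find?_eq_none]
      intro q hq
      obtain ⟨k, hk, rfl⟩ := (PySem.List.mem_enumerate_iff l 0 q).mp hq
      have h2 : l[k] ∈ l := List.getElem_mem hk
      have h3 := List.find?_eq_none.mp hf _ h2
      simp only [List.contains_eq_mem, decide_eq_true_eq] at h3
      intro hbeq
      simp only [beq_iff_eq] at hbeq
      exact h3 (by rw [show pvAdj cs l[k] = w from hbeq]; exact hwmem)
    rw [hnil]
    simp [PySem.List.min?, Option.or]
  | some syn0 =>
    rw [List.find?_eq_some_iff_getElem] at hf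
    obtain ⟨hp0, i0, hi0, hl0, hmin⟩ := hf
    have hw0 : pvAdj cs syn0 ∈ ws := by
      simpa [List.contains_eq_mem] using hp0
    -- the first enumerate entry matching w0 is exactly (i0, syn0)
    have hfw0 : (PySem.List.enumerate l 0).find? (fun p => pvAdj cs p.2 == pvAdj cs syn0)
        = some ((i0 : Int), syn0) := by
      rw [List.find?_eq_some_iff_getElem]
      refine ⟨by simp, i0, by simpa [PySem.List.length_enumerate] using hi0, ?_, ?_⟩
      · rw [PySem.List.getElem_enumerate]
        simp [hl0]
      · intro j hj
        rw [PySem.List.getElem_enumerate]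
        have h4 := hmin j hj
        simp only [Bool.not_eq_true', List.contains_eq_mem, decide_eq_false_iff_not] at h4
        simp only [Bool.not_eq_true', beq_eq_false_iff_ne, ne_eq]
        intro hEq
        exact h4 (by rw [show pvAdj cs l[j] = pvAdj cs syn0 from hEq]; exact hw0)
    have hmem : (i0 : Int) ∈ ws.filterMap
        (fun w => ((PySem.List.enumerate l 0).find? (fun p => pvAdj cs p.2 == w)).map Prod.fst) := by
      rw [List.mem_filterMap]
      exact ⟨pvAdj cs syn0, hw0, by rw [hfw0]; rfl⟩
    have hlb : ∀ x ∈ ws.filterMap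
        (fun w => ((PySem.List.enumerate l 0).find? (fun p => pvAdj cs p.2 == w)).map Prod.fst),
        (i0 : Int) ≤ x := by
      intro x hx
      rw [List.mem_filterMap] at hx
      obtain ⟨w, hwmem, hfind⟩ := hx
      rw [Option.map_eq_some_iff] at hfind
      obtain ⟨q, hq, rfl⟩ := hfind
      have hqmem := List.mem_of_find?_eq_some hq
      have hqp := List.find?_some hq
      obtain ⟨k, hk, rfl⟩ := (PySem.List.mem_enumerate_iff l 0 q).mp hqmem
      simp only [beq_iff_eq] at hqp
      have hik : i0 ≤ k := by
        by_contra hlt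
        have h5 := hmin k (by omega)
        simp only [Bool.not_eq_true', List.contains_eq_mem, decide_eq_false_iff_not] at h5
        exact h5 (by rw [show pvAdj cs l[k] = w from hqp]; exact hwmem)
      have : (i0 : Int) ≤ (k : Int) := by exact_mod_cast hik
      simpa using this
    cases hm : PySem.List.min? (ws.filterMap
        (fun w => ((PySem.List.enumerate l 0).find? (fun p => pvAdj cs p.2 == w)).map Prod.fst))
        (fun x => x) with
    | none =>
      rw [PySem.List.min?_eq_none_iff] at hm
      rw [hm] at hmem
      cases hmem
    | some m =>
      have h1 : m ≤ (i0 : Int) := PySem.List.min?_isMin hm _ hmem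
      have h2 : (i0 : Int) ≤ m := hlb m (PySem.List.min?_mem hm)
      have hmi : m = (i0 : Int) := le_antisymm h1 h2
      subst hmi
      show PySem.List.pyGet? l ((i0 : Nat) : Int) = _
      rw [PySem.List.pyGet?_natCast l i0, List.getElem?_eq_getElem hi0, hl0]
      cases sm <;> simp [Option.or]

-- ===== VERDICT (by name: the statement is the Claim_ definition above) =====

theorem find_synonyms_spec : Claim_equal_find_synonyms := by
  unfold Claim_equal_find_synonyms
  intro ev_text eng_stmt synonym_list cs sm _
  unfold Spec_find_synonyms find_synonyms find_synonyms_alt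
  cases cs <;> cases sm <;>
    simp only [pvPick_eq, pvAdj, pvLoop_eq, Bool.not_true, Bool.not_false,
      Bool.false_eq_true, Bool.true_and, Bool.false_and, if_true, if_false,
      Option.none_or, Option.or_none, Bool.false_eq_true, ite_false, ite_true,
      Bool.false_and, reduceIte] <;>
  first
  | rfl
  | (split_ifs with h
     · rfl
     · simp only [Bool.or_eq_true, Option.isNone_iff_eq_none, not_or] at h
       obtain ⟨h1, h2⟩ := h
       obtain ⟨a, ha⟩ := Option.ne_none_iff_exists'.mp h1
       obtain ⟨b, hb⟩ := Option.ne_none_iff_exists'.mp h2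
       rw [ha, hb]
       simp [Option.or])
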